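-- pv_equiv track=rewrite | github.com/Moonjunyoung/Algorithm | Programmers/Level2/heap/더맵게.py | solution
-- ===== SOURCE A (Python) =====
-- import heapq
--
-- def solution(scoville, K):
--     answer = 0
--     food_list=[]
--     for i in scoville:heapq.heappush(food_list,i)
--
--     while True: # 가장 작은 음식의 스코빌지수가 K보다 작을떄 반복
--           if len(food_list) >=2 and food_list[0] < K:
--              min_food1=heapq.heappop(food_list)
--              min_food2=heapq.heappop(food_list)
--              mix_food=min_food1+min_food2*2
--              heapq.heappush(food_list,mix_food)
--              answer+=1
--           else:
--               break
--
--
--     if food_list[0]<K: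
--         return -1
--     else:
--         return answer
-- ===== SOURCE B (Python) =====
-- def extract_smallest(rest, mixes):
--     if rest and (not mixes or rest[0] <= min(mixes)):
--         return rest.pop(0)
--     smallest = min(mixes)
--     mixes.remove(smallest)
--     return smallest
--
--
-- def solution(scoville, K):
--     rest = sorted(scoville)      # sorted originals, consumed from the front
--     mixes = []                   # unsorted pool of mixed foods
--     answer = 0
--     while True:
--         if mixes and (not rest or min(mixes) < rest[0]):
--             smallest = min(mixes)
--         else:
--             smallest = rest[0]   # IndexError on empty input, like A
--         if len(rest) + len(mixes) < 2 or smallest >= K: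
--             break
--         first = extract_smallest(rest, mixes)
--         second = extract_smallest(rest, mixes)
--         mixes.append(first + 2 * second)
--         answer += 1
--     return -1 if smallest < K else answer
-- ===== Notes on version B (the rewrite author's own statement) =====
-- stated objective: alternative
-- what changed: Replaces the binary heap (heapq sift-up/sift-down on one array) by a sort-once two-pool scheme: the original foods are sorted a single time and consumed from the front, while mixed foods live in a separate unsorted pool whose minimum is found by a linear scan; no ordered structure is maintained after the initial sort.
-- outside the precondition, e.g. on solution([], 5): A raises IndexError, B raises IndexError
import Mathlib
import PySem

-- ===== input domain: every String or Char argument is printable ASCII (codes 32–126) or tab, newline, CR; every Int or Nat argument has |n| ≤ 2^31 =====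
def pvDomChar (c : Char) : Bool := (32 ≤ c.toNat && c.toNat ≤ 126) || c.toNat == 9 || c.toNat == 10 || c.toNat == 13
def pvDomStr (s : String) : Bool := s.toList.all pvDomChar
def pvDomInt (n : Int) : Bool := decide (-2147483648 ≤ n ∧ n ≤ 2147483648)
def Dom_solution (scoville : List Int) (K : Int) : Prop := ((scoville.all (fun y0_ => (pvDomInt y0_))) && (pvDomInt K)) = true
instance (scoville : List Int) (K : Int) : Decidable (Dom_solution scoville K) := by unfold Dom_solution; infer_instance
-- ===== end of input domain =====

-- B replaces A's heap by a sort-once two-pool scheme: the sorted originals are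
-- consumed from the front while mixed foods go to a separate unsorted pool whose
-- minimum is found by a plain scan; no ordered structure is ever maintained for
-- the mixes (objective: alternative).

-- ===== PORT A =====
-- heapq._siftdown(heap, startpos, pos): bubble newitem up along the parent chain.
-- Indices are the nonnegative Python ints; (pos-1)>>1 is (pos-1)/2 on Nat, exact here.
def siftdownAux (heap : List Int) (newitem : Int) (startpos pos : Nat) : List Int :=
  if _h : startpos < pos then
    let parentpos := (pos - 1) / 2
    let parent := heap.getD parentpos 0
    if newitem < parent then
      siftdownAux (heap.set pos parent) newitem startpos parentpos
    else heap.set pos newitem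
  else heap.set pos newitem
termination_by pos
decreasing_by omega

def pySiftdown (heap : List Int) (startpos pos : Nat) : List Int :=
  siftdownAux heap (heap.getD pos 0) startpos pos

-- heapq.heappush
def pyHeappush (heap : List Int) (item : Int) : List Int :=
  pySiftdown (heap ++ [item]) 0 heap.length

-- termination measure of _siftup's chase down the smaller-child chain
theorem siftup_dec (heap : List Int) (v : Int) (pos c : Nat) (h1 : 2 * pos + 1 < heap.length)
    (hc : c = 2 * pos + 1 + 1 ∨ c = 2 * pos + 1) :
    (heap.set pos v).length - c < heap.length - pos := by
  rw [List.length_set]; omega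

-- heapq._siftup(heap, pos): move the hole down to a leaf along the smaller-child
-- chain, then _siftdown from there.
def siftupAux (heap : List Int) (newitem : Int) (startpos pos : Nat) : List Int :=
  let endpos := heap.length
  let childpos := 2 * pos + 1
  if _h : childpos < endpos then
    let rightpos := childpos + 1
    let childpos := if rightpos < endpos ∧ ¬ (heap.getD childpos 0 < heap.getD rightpos 0)
      then rightpos else childpos
    siftupAux (heap.set pos (heap.getD childpos 0)) newitem startpos childpos
  else
    siftdownAux (heap.set pos newitem) newitem startpos pos
termination_by heap.length - pos
decreasing_by
  exact siftup_dec heap _ pos _ _h (ite_eq_or_eq _ _ _)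

def pySiftup (heap : List Int) (pos : Nat) : List Int :=
  siftupAux heap (heap.getD pos 0) pos pos

-- heapq.heappop; none = IndexError on the empty list
def pyHeappop (heap : List Int) : Option (Int × List Int) :=
  match PySem.List.pop? heap (-1) with
  | none => none
  | some (lastelt, rest) =>
    if rest.isEmpty then some (lastelt, [])
    else some (rest.getD 0 0, pySiftup (rest.set 0 lastelt) 0)

-- the while-loop of solution; state (heap, answer); fuel only makes the loop
-- total (the heap shrinks by one per iteration, so fuel = initial size suffices)
def aLoop : Nat → List Int → Int → Int → List Int × Int
  | 0, heap, _K, answer => (heap, answer)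
  | fuel + 1, heap, K, answer =>
    if 2 ≤ heap.length ∧ heap.getD 0 0 < K then
      match pyHeappop heap with
      | some (min_food1, h1) =>
        match pyHeappop h1 with
        | some (min_food2, h2) =>
          aLoop fuel (pyHeappush h2 (min_food1 + min_food2 * 2)) K (answer + 1)
        | none => (h1, answer)
      | none => (heap, answer)
    else (heap, answer)

def solution (scoville : List Int) (K : Int) : Int :=
  let food_list := scoville.foldl (fun h i => pyHeappush h i) []
  let r := aLoop food_list.length food_list K 0
  match PySem.List.pyGet? r.1 0 with
  | none => 0   -- IndexError (empty scoville); excluded by Pre_solution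
  | some v => if v < K then -1 else r.2

-- ===== PORT B =====
-- the inline computation of `smallest` in Source B's loop: min of the two pools
-- (min(mixes) is a scan; rest[0] of the empty rest = IndexError, excluded by Pre_)
def bSmallest (rest mixes : List Int) : Int :=
  if mixes ≠ [] ∧ (rest = [] ∨ (PySem.List.min? mixes (fun x => x)).getD 0 < rest.headD 0) then
    (PySem.List.min? mixes (fun x => x)).getD 0
  else rest.headD 0

-- extract_smallest(rest, mixes): returns (value, rest', mixes')
def bExtract (rest mixes : List Int) : Int × List Int × List Int :=
  if rest ≠ [] ∧ (mixes = [] ∨ rest.headD 0 ≤ (PySem.List.min? mixes (fun x => x)).getD 0) then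
    (rest.headD 0, rest.tail, mixes)
  else
    let s := (PySem.List.min? mixes (fun x => x)).getD 0
    (s, rest, (PySem.List.remove? mixes s).getD mixes)

-- the while-loop of Source B; returns the final int directly; fuel only makes the
-- loop total (the pools shrink by one element per iteration)
def bLoop : Nat → List Int → List Int → Int → Int → Int
  | 0, rest, mixes, K, ans => if bSmallest rest mixes < K then -1 else ans
  | fuel + 1, rest, mixes, K, ans =>
    if rest.length + mixes.length < 2 ∨ K ≤ bSmallest rest mixes then
      if bSmallest rest mixes < K then -1 else ans
    else
      bLoop fuel (bExtract (bExtract rest mixes).2.1 (bExtract rest mixes).2.2).2.1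
        ((bExtract (bExtract rest mixes).2.1 (bExtract rest mixes).2.2).2.2 ++
          [(bExtract rest mixes).1 + 2 * (bExtract (bExtract rest mixes).2.1 (bExtract rest mixes).2.2).1])
        K (ans + 1)

def solution_alt (scoville : List Int) (K : Int) : Int :=
  let food_list := PySem.List.sorted scoville (fun x => x) false
  bLoop food_list.length food_list [] K 0

-- ===== PRECONDITION & SPEC =====
-- Pre_ excludes only the empty list, on which A raises IndexError at food_list[0]
-- (B raises the same IndexError at rest[0]).
def Pre_solution (scoville : List Int) (K : Int) : Prop := scoville ≠ []
instance (scoville : List Int) (K : Int) : Decidable (Pre_solution scoville K) := by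
  unfold Pre_solution; infer_instance

def pvWitness_solution : List Int × Int := ([1, 2, 3], 7)

def Spec_solution (scoville : List Int) (K : Int) (out : Int) : Prop := out = solution_alt scoville K
instance (scoville : List Int) (K : Int) (out : Int) : Decidable (Spec_solution scoville K out) := by
  unfold Spec_solution; infer_instance

-- ===== CLAIM (what is proved, stated in full; the proofs are below) =====
def Claim_equal_solution : Prop := ∀ (scoville : List Int) (K : Int), Dom_solution scoville K → Pre_solution scoville K → Spec_solution scoville K (solution scoville K)

-- ===== LEMMAS AND PROOFS =====
-- utilities
theorem length_siftdownAux (heap : List Int) (newitem : Int) (startpos pos : Nat) :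
    (siftdownAux heap newitem startpos pos).length = heap.length := by
  fun_induction siftdownAux <;> simp_all

theorem length_siftupAux (heap : List Int) (newitem : Int) (startpos pos : Nat) :
    (siftupAux heap newitem startpos pos).length = heap.length := by
  fun_induction siftupAux <;> simp_all [length_siftdownAux]

theorem length_pyHeappop {heap h1 : List Int} {v : Int}
    (h : pyHeappop heap = some (v, h1)) : h1.length + 1 = heap.length := by
  unfold pyHeappop at h
  cases hp : PySem.List.pop? heap (-1) with
  | none => simp [hp] at h
  | some r =>
    have hl := PySem.List.length_of_pop?_eq_some heap hp
    obtain ⟨lastelt, rest⟩ := r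
    rw [hp] at h
    by_cases he : rest.isEmpty <;> simp [he] at h
    · simp_all
    · rw [← h.2, pySiftup, length_siftupAux]
      simp; omega

theorem getD_set0 (l : List Int) (i j : Nat) (v : Int) :
    (l.set i v).getD j 0 = if i = j ∧ i < l.length then v else l.getD j 0 := by
  simp only [List.getD_eq_getElem?_getD, List.getElem?_set]
  split_ifs with h1 h2 h3 <;> simp_all <;> omega

theorem perm_set_eraseIdx (l : List Int) (i : Nat) (a : Int) (h : i < l.length) :
    (l.set i a).Perm (a :: l.eraseIdx i) := by
  rw [List.set_eq_take_cons_drop a h, List.eraseIdx_eq_take_drop_succ]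
  exact List.perm_middle

theorem perm_cons_eraseIdx (l : List Int) (i : Nat) (h : i < l.length) :
    l.Perm (l.getD i 0 :: l.eraseIdx i) := by
  have hg : l.getD i 0 = l[i] := by
    simp [List.getD_eq_getElem?_getD, List.getElem?_eq_getElem h]
  rw [hg]
  have := perm_set_eraseIdx l i l[i] h
  rwa [List.set_getElem_self h] at this

theorem eraseIdx_set_perm (l : List Int) (i j : Nat) (hi : i < l.length)
    (hj : j < l.length) (hne : i ≠ j) :
    ((l.set i (l.getD j 0)).eraseIdx j).Perm (l.eraseIdx i) := by
  induction l generalizing i j with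
  | nil => simp at hi
  | cons a t ih =>
    cases i with
    | zero =>
      cases j with
      | zero => omega
      | succ k =>
        simp only [List.getD_cons_succ, List.set_cons_zero, List.eraseIdx_cons_succ,
          List.eraseIdx_cons_zero]
        exact (perm_cons_eraseIdx t k (by simpa using hj)).symm
    | succ i' =>
      cases j with
      | zero =>
        simp only [List.getD_cons_zero, List.set_cons_succ, List.eraseIdx_cons_zero,
          List.eraseIdx_cons_succ]
        exact perm_set_eraseIdx t i' a (by simpa using hi)
      | succ j' =>
        simp only [List.getD_cons_succ, List.set_cons_succ, List.eraseIdx_cons_succ]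
        exact (ih i' j' (by simpa using hi) (by simpa using hj) (by omega)).cons a

theorem perm_set_swap (l : List Int) (i j : Nat) (w : Int) (hi : i < l.length)
    (hj : j < l.length) :
    ((l.set i (l.getD j 0)).set j w).Perm (l.set i w) := by
  by_cases hij : i = j
  · subst hij; rw [List.set_set]
  · have h1 : j < (l.set i (l.getD j 0)).length := by simpa using hj
    refine ((perm_set_eraseIdx _ j w h1).trans ?_).trans (perm_set_eraseIdx l i w hi).symm
    exact (eraseIdx_set_perm l i j hi hj hij).cons w

def IsHeap (h : List Int) : Prop :=
  ∀ j : Nat, 0 < j → j < h.length → h.getD ((j-1)/2) 0 ≤ h.getD j 0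

theorem siftdownAux_spec : ∀ (pos : Nat) (h : List Int) (newitem : Int),
    pos < h.length →
    (∀ j, 0 < j → j < h.length → j ≠ pos →
      (h.set pos newitem).getD ((j-1)/2) 0 ≤ (h.set pos newitem).getD j 0) →
    (0 < pos → ∀ j, 0 < j → j < h.length → (j-1)/2 = pos →
      (h.set pos newitem).getD ((pos-1)/2) 0 ≤ (h.set pos newitem).getD j 0) →
    IsHeap (siftdownAux h newitem 0 pos) ∧
      (siftdownAux h newitem 0 pos).Perm (h.set pos newitem) := by
  intro pos
  induction pos using Nat.strong_induction_on with
  | _ pos ih =>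
    intro h newitem hlen h1 h2
    have G : ∀ j, (h.set pos newitem).getD j 0
        = if pos = j ∧ pos < h.length then newitem else h.getD j 0 :=
      fun j => getD_set0 h pos j newitem
    rw [siftdownAux]
    by_cases hp : 0 < pos
    · simp only [hp, dif_pos]
      by_cases hlt : newitem < h.getD ((pos - 1) / 2) 0
      · simp only [hlt, if_pos]
        -- pure-form consequences of h1 / h2
        have H1 : ∀ j', 0 < j' → j' < h.length → j' ≠ pos → (j'-1)/2 ≠ pos →
            h.getD ((j'-1)/2) 0 ≤ h.getD j' 0 := by
          intro j' a b c d
          have := h1 j' a b c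
          rw [G, G, if_neg (by omega), if_neg (by omega)] at this
          exact this
        have H2 : ∀ j', 0 < j' → j' < h.length → (j'-1)/2 = pos →
            h.getD ((pos-1)/2) 0 ≤ h.getD j' 0 := by
          intro j' a b c
          have hne : j' ≠ pos := by omega
          have := h2 hp j' a b c
          rw [G, G, if_neg (by omega), if_neg (by omega)] at this
          exact this
        have hlen' : (h.set pos (h.getD ((pos - 1) / 2) 0)).length = h.length := by simp
        have G' : ∀ j, ((h.set pos (h.getD ((pos - 1) / 2) 0)).set ((pos - 1) / 2) newitem).getD j 0
            = if (pos - 1) / 2 = j ∧ (pos - 1) / 2 < h.length then newitem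
              else if pos = j ∧ pos < h.length then h.getD ((pos - 1) / 2) 0 else h.getD j 0 := by
          intro j
          rw [getD_set0, hlen', getD_set0]
        have hpplt : (pos - 1) / 2 < pos := by omega
        have main := ih ((pos - 1) / 2) hpplt (h.set pos (h.getD ((pos - 1) / 2) 0)) newitem
          (by rw [hlen']; omega)
          (by
            intro j hj0 hjlen hjne
            rw [hlen'] at hjlen
            rw [G', G']
            by_cases hje : j = pos
            · rw [if_pos (by omega), if_neg (by omega), if_pos (by omega)]
              · exact le_of_lt hlt
            · by_cases hcp : (j - 1) / 2 = pos
              · rw [if_neg (by omega), if_pos (by omega), if_neg (by omega),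
                  if_neg (by omega)]
                exact H2 j hj0 hjlen hcp
              · by_cases hcpp : (j - 1) / 2 = (pos - 1) / 2
                · rw [if_pos (by omega), if_neg (by omega), if_neg (by omega)]
                  have := H1 j hj0 hjlen hje (by omega)
                  rw [hcpp] at this
                  omega
                · rw [if_neg (by omega), if_neg (by omega), if_neg (by omega),
                    if_neg (by omega)]
                  exact H1 j hj0 hjlen hje (by omega))
          (by
            intro hpp0 j hj0 hjlen hcj
            rw [hlen'] at hjlen
            rw [G', G']
            have hppne : (pos - 1) / 2 ≠ pos := by omega
            have hself := H1 ((pos - 1) / 2) hpp0 (by omega) hppne (by omega)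
            by_cases hje : j = pos
            · rw [if_neg (by omega), if_neg (by omega), if_neg (by omega),
                if_pos (by omega)]
              exact hself
            · rw [if_neg (by omega), if_neg (by omega), if_neg (by omega),
                if_neg (by omega)]
              have h2nd := H1 j hj0 hjlen hje (by omega)
              rw [hcj] at h2nd
              omega)
        refine ⟨main.1, main.2.trans ?_⟩
        exact perm_set_swap h pos ((pos - 1) / 2) newitem hlen (by omega)
      · rw [if_neg hlt]
        refine ⟨?_, List.Perm.refl _⟩
        intro j hj0 hjlen
        rw [List.length_set] at hjlen
        by_cases hje : j = pos
        · subst hje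
          rw [G, G, if_neg (by omega), if_pos (by omega)]
          omega
        · exact h1 j hj0 hjlen hje
    · rw [dif_neg hp]
      refine ⟨?_, List.Perm.refl _⟩
      intro j hj0 hjlen
      rw [List.length_set] at hjlen
      exact h1 j hj0 hjlen (by omega)

theorem siftupAux_spec : ∀ (n : Nat) (h : List Int) (newitem : Int) (pos : Nat),
    h.length - pos = n → pos < h.length →
    (∀ j, 0 < j → j < h.length → j ≠ pos → (j-1)/2 ≠ pos →
      h.getD ((j-1)/2) 0 ≤ h.getD j 0) →
    (0 < pos → ∀ j, 0 < j → j < h.length → (j-1)/2 = pos →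
      h.getD ((pos-1)/2) 0 ≤ h.getD j 0) →
    IsHeap (siftupAux h newitem 0 pos) ∧
      (siftupAux h newitem 0 pos).Perm (h.set pos newitem) := by
  intro n
  induction n using Nat.strong_induction_on with
  | _ n ih =>
    intro h newitem pos hn hlen J1 J2
    rw [siftupAux]
    simp only []
    by_cases hleaf : 2 * pos + 1 < h.length
    · rw [dif_pos hleaf]
      by_cases hsel : 2 * pos + 1 + 1 < h.length ∧
          ¬ h.getD (2 * pos + 1) 0 < h.getD (2 * pos + 1 + 1) 0
      · rw [if_pos hsel]
        have hcp : 2 * pos + 1 + 1 < h.length := by omega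
        have hmin : h.getD (2 * pos + 1 + 1) 0 ≤ h.getD (2 * pos + 1) 0 := by omega
        have hrec := ih (h.length - (2 * pos + 1 + 1)) (by omega)
          (h.set pos (h.getD (2 * pos + 1 + 1) 0)) newitem (2 * pos + 1 + 1)
          (by simp only [List.length_set]) (by simp only [List.length_set]; omega)
          (by
            intro j hj0 hjlen hne hpar
            rw [List.length_set] at hjlen
            rw [getD_set0, getD_set0]
            by_cases hje : j = pos
            · rw [if_neg (by omega), if_pos (by omega), hje]
              rcases Nat.eq_zero_or_pos pos with hz | hpz
              · omega
              · exact J2 hpz (2 * pos + 1 + 1) (by omega) hcp (by omega)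
            · by_cases hjc : (j - 1) / 2 = pos
              · rw [if_pos (by omega), if_neg (by omega)]
                have hj1 : j = 2 * pos + 1 := by omega
                subst hj1
                omega
              · rw [if_neg (by omega), if_neg (by omega)]
                exact J1 j hj0 hjlen hje hjc)
          (by
            intro _ j hj0 hjlen hpar
            rw [List.length_set] at hjlen
            have hcpar : (2 * pos + 1 + 1 - 1) / 2 = pos := by omega
            rw [hcpar, getD_set0, getD_set0]
            rw [if_pos (by omega), if_neg (by omega), ← hpar]
            exact J1 j hj0 hjlen (by omega) (by omega))
        refine ⟨hrec.1, hrec.2.trans ?_⟩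
        exact perm_set_swap h pos (2 * pos + 1 + 1) newitem hlen hcp
      · rw [if_neg hsel]
        have hmin : 2 * pos + 1 + 1 < h.length → h.getD (2 * pos + 1) 0 ≤ h.getD (2 * pos + 1 + 1) 0 := by
          intro hr
          rcases not_and_or.mp hsel with hc | hc
          · omega
          · rw [not_not] at hc; omega
        have hrec := ih (h.length - (2 * pos + 1)) (by omega)
          (h.set pos (h.getD (2 * pos + 1) 0)) newitem (2 * pos + 1)
          (by simp only [List.length_set]) (by simp only [List.length_set]; omega)
          (by
            intro j hj0 hjlen hne hpar
            rw [List.length_set] at hjlen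
            rw [getD_set0, getD_set0]
            by_cases hje : j = pos
            · rw [if_neg (by omega), if_pos (by omega), hje]
              rcases Nat.eq_zero_or_pos pos with hz | hpz
              · omega
              · exact J2 hpz (2 * pos + 1) (by omega) hleaf (by omega)
            · by_cases hjc : (j - 1) / 2 = pos
              · rw [if_pos (by omega), if_neg (by omega)]
                have hj1 : j = 2 * pos + 1 + 1 := by omega
                subst hj1
                exact hmin hjlen
              · rw [if_neg (by omega), if_neg (by omega)]
                exact J1 j hj0 hjlen hje hjc)
          (by
            intro _ j hj0 hjlen hpar
            rw [List.length_set] at hjlen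
            have hcpar : (2 * pos + 1 - 1) / 2 = pos := by omega
            rw [hcpar, getD_set0, getD_set0]
            rw [if_pos (by omega), if_neg (by omega), ← hpar]
            exact J1 j hj0 hjlen (by omega) (by omega))
        refine ⟨hrec.1, hrec.2.trans ?_⟩
        exact perm_set_swap h pos (2 * pos + 1) newitem hlen hleaf
    · rw [dif_neg hleaf]
      have hset : (h.set pos newitem).set pos newitem = h.set pos newitem := List.set_set _
      have := siftdownAux_spec pos (h.set pos newitem) newitem (by simp [hlen])
        (by
          intro j hj0 hjlen hne
          rw [List.length_set] at hjlen
          rw [hset, getD_set0, getD_set0]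
          by_cases hjc : (j - 1) / 2 = pos
          · omega
          · rw [if_neg (by omega), if_neg (by omega)]
            exact J1 j hj0 hjlen hne hjc)
        (by
          intro hp j hj0 hjlen hjc
          rw [List.length_set] at hjlen
          omega)
      rw [hset] at this
      exact this

theorem isHeap_root_le (h : List Int) (hh : IsHeap h) :
    ∀ j, j < h.length → h.getD 0 0 ≤ h.getD j 0 := by
  intro j
  induction j using Nat.strong_induction_on with
  | _ j ih =>
    intro hj
    rcases Nat.eq_zero_or_pos j with hz | hp
    · subst hz; exact le_refl _
    · exact le_trans (ih ((j-1)/2) (by omega) (by omega)) (hh j hp hj)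

theorem pyHeappush_spec (h : List Int) (x : Int) (hh : IsHeap h) :
    IsHeap (pyHeappush h x) ∧ (pyHeappush h x).Perm (x :: h) := by
  have hset : (h ++ [x]).set h.length x = h ++ [x] := by
    rw [List.set_append_right _ _ (le_refl _)]; simp
  have hgx : (h ++ [x]).getD h.length 0 = x := by
    simp [List.getD_eq_getElem?_getD, List.getElem?_append_right (le_refl _)]
  have hlen : h.length < (h ++ [x]).length := by simp
  have main := siftdownAux_spec h.length (h ++ [x]) x hlen
    (by
      intro j hj0 hjlen hne
      rw [hset]
      have hjh : j < h.length := by simp at hjlen; omega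
      have hgj : (h ++ [x]).getD j 0 = h.getD j 0 := by
        simp [List.getD_eq_getElem?_getD, List.getElem?_append_left hjh]
      have hgp : (h ++ [x]).getD ((j-1)/2) 0 = h.getD ((j-1)/2) 0 := by
        have : (j-1)/2 < h.length := by omega
        simp [List.getD_eq_getElem?_getD, List.getElem?_append_left this]
      rw [hgj, hgp]
      exact hh j hj0 hjh)
    (by
      intro hp j hj0 hjlen hpar
      simp at hjlen
      omega)
  rw [hset] at main
  unfold pyHeappush pySiftdown
  rw [hgx]
  exact ⟨main.1, main.2.trans (List.perm_append_singleton x h)⟩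

theorem pyHeappop_concat (xs : List Int) (x : Int) :
    pyHeappop (xs ++ [x]) = if xs.isEmpty then some (x, [])
      else some (xs.getD 0 0, pySiftup (xs.set 0 x) 0) := by
  unfold pyHeappop
  rw [PySem.List.pop?_last]

theorem pyHeappop_spec (h : List Int) (hh : IsHeap h) (hne : h ≠ []) :
    ∃ h', pyHeappop h = some (h.getD 0 0, h') ∧ IsHeap h' ∧
      h.Perm (h.getD 0 0 :: h') := by
  obtain ⟨xs, x, rfl⟩ : ∃ xs x, h = xs ++ [x] :=
    ⟨h.dropLast, h.getLast hne, (List.dropLast_concat_getLast hne).symm⟩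
  rw [pyHeappop_concat]
  by_cases hxe : xs = []
  · subst hxe
    refine ⟨[], by simp, by intro j hj0 hjl; simp at hjl, by simp⟩
  · obtain ⟨r0, t, rfl⟩ : ∃ r0 t, xs = r0 :: t := by
      cases xs with
      | nil => exact absurd rfl hxe
      | cons a b => exact ⟨a, b, rfl⟩
    rw [show (r0 :: t).isEmpty = false from rfl]
    simp only [Bool.false_eq_true, if_false]
    have hsetc : (r0 :: t).set 0 x = x :: t := rfl
    rw [hsetc]
    have hgt : ∀ j : Nat, 0 < j → j ≤ t.length →
        ((r0 :: t) ++ [x]).getD j 0 = t.getD (j-1) 0 := by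
      intro j hj0 hjle
      cases j with
      | zero => omega
      | succ i =>
        show (r0 :: (t ++ [x])).getD (i+1) 0 = t.getD i 0
        rw [List.getD_cons_succ]
        simp [List.getD_eq_getElem?_getD,
          List.getElem?_append_left (show i < t.length by omega)]
    have hxt : ∀ j : Nat, 0 < j → (x :: t).getD j 0 = t.getD (j-1) 0 := by
      intro j hj0
      cases j with
      | zero => omega
      | succ i => rw [List.getD_cons_succ]; norm_num
    have main := siftupAux_spec ((x :: t).length) (x :: t) x 0 (by simp) (by simp)
      (by
        intro j hj0 hjlen hne0 hpar
        rw [hxt j hj0, hxt ((j-1)/2) (by omega)]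
        have := hh j hj0 (by simp at hjlen ⊢; omega)
        rw [hgt j hj0 (by simp at hjlen; omega),
          hgt ((j-1)/2) (by omega) (by simp at hjlen; omega)] at this
        exact this)
      (by omega)
    have hsetc2 : (x :: t).set 0 x = x :: t := rfl
    rw [hsetc2] at main
    refine ⟨siftupAux (x :: t) x 0 0, rfl, main.1, ?_⟩
    have hr0 : ((r0 :: t) ++ [x]).getD 0 0 = r0 := rfl
    rw [hr0]
    have p2 : ((r0 :: t) ++ [x]).Perm (r0 :: x :: t) :=
      (List.perm_append_singleton x t).cons r0
    exact p2.trans (main.2.symm.cons r0)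

def SortedLe (l : List Int) : Prop := l.Pairwise (· ≤ ·)

def MinOf (v : Int) (l : List Int) : Prop := v ∈ l ∧ ∀ y ∈ l, v ≤ y

theorem minOf_unique {v w : Int} {l : List Int} (hv : MinOf v l) (hw : MinOf w l) : v = w :=
  le_antisymm (hv.2 w hw.1) (hw.2 v hv.1)

theorem root_minOf (h : List Int) (hh : IsHeap h) (hne : h ≠ []) : MinOf (h.getD 0 0) h := by
  have hlen : 0 < h.length := List.length_pos_iff.mpr hne
  constructor
  · have : h.getD 0 0 = h[0] := by
      simp [List.getD_eq_getElem?_getD, List.getElem?_eq_getElem hlen]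
    rw [this]
    exact List.getElem_mem hlen
  · intro y hy
    obtain ⟨j, hj, hjy⟩ := List.mem_iff_getElem.mp hy
    have := isHeap_root_le h hh j hj
    have hgj : h.getD j 0 = y := by
      rw [List.getD_eq_getElem?_getD, List.getElem?_eq_getElem hj, Option.getD_some, hjy]
    rwa [hgj] at this

theorem root_eq_min (h l : List Int) (hh : IsHeap h) (hp : h.Perm l) (hne : h ≠ [])
    {v : Int} (hm : MinOf v l) : h.getD 0 0 = v := by
  have hr := root_minOf h hh hne
  exact minOf_unique ⟨hp.mem_iff.mp hr.1, fun y hy => hr.2 y (hp.mem_iff.mpr hy)⟩ hm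

theorem sorted_head_le (rest : List Int) (hs : SortedLe rest) (hne : rest ≠ []) :
    ∀ y ∈ rest, rest.headD 0 ≤ y := by
  cases rest with
  | nil => exact absurd rfl hne
  | cons a t =>
    intro y hy
    rcases List.mem_cons.mp hy with rfl | hm
    · exact le_refl _
    · exact (List.pairwise_cons.mp hs).1 y hm

theorem min_getD_spec (mixes : List Int) (hm : mixes ≠ []) :
    MinOf ((PySem.List.min? mixes (fun x => x)).getD 0) mixes := by
  obtain ⟨m, hmin⟩ : ∃ m, PySem.List.min? mixes (fun x => x) = some m := by
    cases hx : PySem.List.min? mixes (fun x => x) with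
    | none => exact absurd ((PySem.List.min?_eq_none_iff _ _).mp hx) hm
    | some m => exact ⟨m, rfl⟩
  rw [hmin, Option.getD_some]
  exact ⟨PySem.List.min?_mem hmin, fun y hy => PySem.List.min?_isMin hmin y hy⟩

theorem bSmallest_minOf (rest mixes : List Int) (hs : SortedLe rest)
    (hne : rest ≠ [] ∨ mixes ≠ []) : MinOf (bSmallest rest mixes) (rest ++ mixes) := by
  unfold bSmallest
  by_cases hc : mixes ≠ [] ∧ (rest = [] ∨ (PySem.List.min? mixes (fun x => x)).getD 0 < rest.headD 0)
  · rw [if_pos hc]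
    have hmm := min_getD_spec mixes hc.1
    refine ⟨List.mem_append_right _ hmm.1, ?_⟩
    intro y hy
    rcases List.mem_append.mp hy with hr | hm
    · rcases hc.2 with he | hlt
      · rw [he] at hr; simp at hr
      · have hrne : rest ≠ [] := by rintro rfl; simp at hr
        exact le_trans (le_of_lt hlt) (sorted_head_le rest hs hrne y hr)
    · exact hmm.2 y hm
  · rw [if_neg hc]
    push_neg at hc
    by_cases hme : mixes = []
    · have hrne : rest ≠ [] := by
        rcases hne with h | h
        · exact h
        · exact absurd hme h
      subst hme
      refine ⟨?_, ?_⟩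
      · cases rest with
        | nil => exact absurd rfl hrne
        | cons a t => simp
      · intro y hy
        simp only [List.append_nil] at hy
        exact sorted_head_le rest hs hrne y hy
    · obtain ⟨hrne, hle⟩ := hc hme
      refine ⟨?_, ?_⟩
      · cases rest with
        | nil => exact absurd rfl hrne
        | cons a t => simp
      · intro y hy
        rcases List.mem_append.mp hy with hr | hm
        · exact sorted_head_le rest hs hrne y hr
        · exact le_trans hle ((min_getD_spec mixes hme).2 y hm)

theorem bExtract_spec (rest mixes : List Int) (hs : SortedLe rest)
    (hne : rest ≠ [] ∨ mixes ≠ []) :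
    MinOf (bExtract rest mixes).1 (rest ++ mixes) ∧
    SortedLe (bExtract rest mixes).2.1 ∧
    (rest ++ mixes).Perm
      ((bExtract rest mixes).1 :: ((bExtract rest mixes).2.1 ++ (bExtract rest mixes).2.2)) := by
  unfold bExtract
  by_cases hc : rest ≠ [] ∧ (mixes = [] ∨ rest.headD 0 ≤ (PySem.List.min? mixes (fun x => x)).getD 0)
  · rw [if_pos hc]
    cases rest with
    | nil => exact absurd rfl hc.1
    | cons a t =>
      simp only [List.headD_cons, List.tail_cons]
      refine ⟨⟨by simp, ?_⟩, (List.pairwise_cons.mp hs).2, by simp⟩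
      intro y hy
      rcases List.mem_append.mp hy with hr | hm
      · exact sorted_head_le (a :: t) hs (by simp) y hr
      · rcases hc.2 with he | hle
        · rw [he] at hm; simp at hm
        · exact le_trans hle ((min_getD_spec mixes (by rintro rfl; simp at hm)).2 y hm)
  · rw [if_neg hc]
    push_neg at hc
    have hme : mixes ≠ [] := by
      by_cases hre : rest = []
      · rcases hne with h | h
        · exact absurd hre h
        · exact h
      · exact (hc hre).1
    have hmm := min_getD_spec mixes hme
    simp only []
    rw [PySem.List.remove?_eq_some_erase mixes _ hmm.1, Option.getD_some]
    refine ⟨⟨List.mem_append_right _ hmm.1, ?_⟩, hs, ?_⟩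
    · intro y hy
      rcases List.mem_append.mp hy with hr | hm
      · have hrne : rest ≠ [] := by rintro rfl; simp at hr
        exact le_of_lt (lt_of_lt_of_le ((hc hrne).2) (sorted_head_le rest hs hrne y hr))
      · exact hmm.2 y hm
    · have p1 : mixes.Perm ((PySem.List.min? mixes (fun x => x)).getD 0 :: mixes.erase ((PySem.List.min? mixes (fun x => x)).getD 0)) :=
        List.perm_cons_erase hmm.1
      exact ((List.Perm.append_left rest p1).trans List.perm_middle)

theorem aLoop_stop (fuel : Nat) (heap : List Int) (K ans : Int)
    (h : ¬ (2 ≤ heap.length ∧ heap.getD 0 0 < K)) : aLoop fuel heap K ans = (heap, ans) := by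
  cases fuel with
  | zero => rfl
  | succ f => rw [aLoop, if_neg h]

theorem aLoop_step (fuel : Nat) (heap : List Int) (K ans : Int) {v1 v2 : Int} {h1 h2 : List Int}
    (hg : 2 ≤ heap.length ∧ heap.getD 0 0 < K)
    (hp1 : pyHeappop heap = some (v1, h1)) (hp2 : pyHeappop h1 = some (v2, h2)) :
    aLoop (fuel + 1) heap K ans = aLoop fuel (pyHeappush h2 (v1 + v2 * 2)) K (ans + 1) := by
  rw [aLoop, if_pos hg]
  split
  · next v1' h1' heq =>
    rw [hp1] at heq
    injection heq with heq
    injection heq with heq1 heq2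
    subst heq1; subst heq2
    split
    · next v2' h2' heq' =>
      rw [hp2] at heq'
      injection heq' with heq'
      injection heq' with heq1' heq2'
      subst heq1'; subst heq2'
      rfl
    · next heq' => rw [hp2] at heq'; cases heq'
  · next heq => rw [hp1] at heq; cases heq

theorem foldl_heappush_spec : ∀ (xs h0 : List Int), IsHeap h0 →
    IsHeap (xs.foldl (fun h i => pyHeappush h i) h0) ∧
      (xs.foldl (fun h i => pyHeappush h i) h0).Perm (h0 ++ xs) := by
  intro xs
  induction xs with
  | nil => intro h0 hh; exact ⟨hh, by simp⟩
  | cons x xs ih =>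
    intro h0 hh
    have hp := pyHeappush_spec h0 x hh
    have hrec := ih (pyHeappush h0 x) hp.1
    refine ⟨hrec.1, hrec.2.trans ?_⟩
    exact (hp.2.append_right xs).trans List.perm_middle.symm

theorem loop_eq : ∀ (fuel : Nat) (heap rest mixes : List Int) (K ans : Int),
    heap.length ≤ fuel → IsHeap heap → SortedLe rest → heap.Perm (rest ++ mixes) → heap ≠ [] →
    (match PySem.List.pyGet? (aLoop fuel heap K ans).1 0 with
     | none => 0
     | some v => if v < K then -1 else (aLoop fuel heap K ans).2) = bLoop fuel rest mixes K ans := by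
  intro fuel
  induction fuel with
  | zero =>
    intro heap rest mixes K ans hn _ _ _ hne
    exact absurd (List.length_eq_zero_iff.mp (Nat.le_zero.mp hn)) hne
  | succ f ih =>
    intro heap rest mixes K ans hn hh hs hp hne
    have hlen : heap.length = rest.length + mixes.length := by
      simpa using hp.length_eq
    have hcne : rest ≠ [] ∨ mixes ≠ [] := by
      by_contra hb
      push_neg at hb
      rw [hb.1, hb.2] at hlen
      simp at hlen
      exact hne hlen
    have hroot : heap.getD 0 0 = bSmallest rest mixes :=
      root_eq_min heap (rest ++ mixes) hh hp hne (bSmallest_minOf rest mixes hs hcne)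
    rw [bLoop]
    by_cases hstop : rest.length + mixes.length < 2 ∨ K ≤ bSmallest rest mixes
    · rw [if_pos hstop]
      have hng : ¬ (2 ≤ heap.length ∧ heap.getD 0 0 < K) := by
        rw [hroot, hlen]
        rcases hstop with h | h
        · omega
        · intro hx; omega
      rw [aLoop_stop (f + 1) heap K ans hng]
      obtain ⟨a, t, rfl⟩ : ∃ a t, heap = a :: t := by
        cases heap with
        | nil => exact absurd rfl hne
        | cons a t => exact ⟨a, t, rfl⟩
      rw [PySem.List.pyGet?_zero]
      simp only [List.getElem?_cons_zero]
      have ha : a = bSmallest rest mixes := hroot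
      rw [ha]
    · rw [if_neg hstop]
      push_neg at hstop
      have hg : 2 ≤ heap.length ∧ heap.getD 0 0 < K := by
        rw [hroot, hlen]
        exact ⟨by omega, hstop.2⟩
      -- first extraction
      have hx1 := bExtract_spec rest mixes hs hcne
      obtain ⟨h1, hp1, hh1, hperm1⟩ := pyHeappop_spec heap hh hne
      have hv1 : heap.getD 0 0 = (bExtract rest mixes).1 :=
        root_eq_min heap (rest ++ mixes) hh hp hne hx1.1
      have hperm1' : h1.Perm ((bExtract rest mixes).2.1 ++ (bExtract rest mixes).2.2) := by
        have : (heap.getD 0 0 :: h1).Perm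
            ((bExtract rest mixes).1 :: ((bExtract rest mixes).2.1 ++ (bExtract rest mixes).2.2)) :=
          (hperm1.symm.trans hp).trans hx1.2.2
        rw [hv1] at this
        exact this.cons_inv
      have hlen1 : h1.length + 1 = heap.length := length_pyHeappop hp1
      have hne1 : h1 ≠ [] := by
        intro h0
        rw [h0] at hlen1
        simp at hlen1
        omega
      have hcne1 : (bExtract rest mixes).2.1 ≠ [] ∨ (bExtract rest mixes).2.2 ≠ [] := by
        by_contra hb
        push_neg at hb
        have := hperm1'.length_eq
        rw [hb.1, hb.2] at this
        simp at this
        exact hne1 this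
      -- second extraction
      have hx2 := bExtract_spec (bExtract rest mixes).2.1 (bExtract rest mixes).2.2 hx1.2.1 hcne1
      obtain ⟨h2, hp2, hh2, hperm2⟩ := pyHeappop_spec h1 hh1 hne1
      have hv2 : h1.getD 0 0 = (bExtract (bExtract rest mixes).2.1 (bExtract rest mixes).2.2).1 :=
        root_eq_min h1 _ hh1 hperm1' hne1 hx2.1
      have hperm2' : h2.Perm
          ((bExtract (bExtract rest mixes).2.1 (bExtract rest mixes).2.2).2.1 ++
           (bExtract (bExtract rest mixes).2.1 (bExtract rest mixes).2.2).2.2) := by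
        have : (h1.getD 0 0 :: h2).Perm
            ((bExtract (bExtract rest mixes).2.1 (bExtract rest mixes).2.2).1 ::
              ((bExtract (bExtract rest mixes).2.1 (bExtract rest mixes).2.2).2.1 ++
               (bExtract (bExtract rest mixes).2.1 (bExtract rest mixes).2.2).2.2)) :=
          (hperm2.symm.trans hperm1').trans hx2.2.2
        rw [hv2] at this
        exact this.cons_inv
      -- push the mix
      have hmixeq : heap.getD 0 0 + h1.getD 0 0 * 2
          = (bExtract rest mixes).1 + 2 * (bExtract (bExtract rest mixes).2.1 (bExtract rest mixes).2.2).1 := by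
        rw [hv1, hv2]; ring
      have hpush := pyHeappush_spec h2 (heap.getD 0 0 + h1.getD 0 0 * 2) hh2
      have hlen2 : h2.length + 1 = h1.length := length_pyHeappop hp2
      have hplen : (pyHeappush h2 (heap.getD 0 0 + h1.getD 0 0 * 2)).length ≤ f := by
        have := hpush.2.length_eq
        simp only [List.length_cons] at this
        omega
      have hpne : pyHeappush h2 (heap.getD 0 0 + h1.getD 0 0 * 2) ≠ [] := by
        intro h0
        have := hpush.2.length_eq
        rw [h0] at this
        simp at this
      have hpperm : (pyHeappush h2 (heap.getD 0 0 + h1.getD 0 0 * 2)).Perm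
          ((bExtract (bExtract rest mixes).2.1 (bExtract rest mixes).2.2).2.1 ++
           ((bExtract (bExtract rest mixes).2.1 (bExtract rest mixes).2.2).2.2 ++
            [(bExtract rest mixes).1 + 2 * (bExtract (bExtract rest mixes).2.1 (bExtract rest mixes).2.2).1])) := by
        refine hpush.2.trans ?_
        rw [hmixeq]
        refine ((hperm2'.cons _).trans ?_)
        rw [← List.append_assoc]
        exact (List.perm_append_singleton _ _).symm.trans (List.Perm.refl _) |>.symm.symm
      rw [aLoop_step f heap K ans hg hp1 hp2]
      exact ih _ _ _ K (ans + 1) hplen hpush.1 hx2.2.1 hpperm hpne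

theorem solution_eq_alt (scoville : List Int) (K : Int) (hpre : scoville ≠ []) :
    solution scoville K = solution_alt scoville K := by
  simp only [solution, solution_alt]
  have hbuild := foldl_heappush_spec scoville [] (by intro j hj0 hjl; simp at hjl)
  have hsortp : (PySem.List.sorted scoville (fun x => x) false).Perm scoville :=
    PySem.List.sorted_perm scoville (fun x => x) false
  have hsorted : SortedLe (PySem.List.sorted scoville (fun x => x) false) :=
    PySem.List.sorted_pairwise scoville (fun x => x)
  have hperm0 : (scoville.foldl (fun h i => pyHeappush h i) []).Perm
      (PySem.List.sorted scoville (fun x => x) false ++ []) := by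
    rw [List.append_nil]
    refine (hbuild.2.trans ?_).trans hsortp.symm
    simp
  have hne0 : scoville.foldl (fun h i => pyHeappush h i) [] ≠ [] := by
    intro h0
    have := hbuild.2.length_eq
    rw [h0] at this
    simp at this
    exact hpre (List.length_eq_zero_iff.mp this.symm)
  have hfuel : (PySem.List.sorted scoville (fun x => x) false).length
      = (scoville.foldl (fun h i => pyHeappush h i) []).length := by
    simpa using hperm0.length_eq.symm
  rw [hfuel]
  exact loop_eq _ (scoville.foldl (fun h i => pyHeappush h i) [])
    (PySem.List.sorted scoville (fun x => x) false) [] K 0 (le_refl _) hbuild.1 hsorted hperm0 hne0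

-- ===== VERDICT (by name: the statement is the Claim_ definition above) =====
theorem solution_spec : Claim_equal_solution := by
  unfold Claim_equal_solution Spec_solution
  intro scoville K _ hpre
  exact solution_eq_alt scoville K hpre
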